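-- pv_equiv track=rewrite | github.com/DaxGute/Week-13-HW | src/SentimentAnalysisDictionary.py | getScoresFromHighestToLowest
-- ===== SOURCE A (Python) =====
-- def getScoresFromHighestToLowest(uniqueWordsRatings):
--     orderedWords = []
--
--     for unorderedWord in uniqueWordsRatings:
--         wordOrdered = False
--
--         for i in range(len(orderedWords)):
--             orderedWord = orderedWords[i]
--
--             if uniqueWordsRatings[unorderedWord] >= uniqueWordsRatings[orderedWord]:
--                 orderedWords.insert(i, unorderedWord)
--                 wordOrdered = True
--                 break
--
--         if (not wordOrdered):
--             orderedWords.append(unorderedWord)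
--
--     return orderedWords
-- ===== SOURCE B (Python) =====
-- def getScoresFromHighestToLowest(uniqueWordsRatings):
--     # Idiomatic: stable built-in sort, descending; reversing first reproduces
--     # the "later keys before earlier keys on equal ratings" order.
--     orderedWords = list(uniqueWordsRatings)
--     orderedWords.reverse()
--     orderedWords.sort(key=uniqueWordsRatings.get, reverse=True)
--     return orderedWords
-- ===== Notes on version B (the rewrite author's own statement) =====
-- stated objective: faster
-- what changed: Replaces A's hand-rolled quadratic insertion sort (scan the ordered list and insert before the first element with a smaller-or-equal rating) by reversing the key list and calling the built-in stable sort with reverse=True, whose stability reproduces A's reversed tie order.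
import Mathlib
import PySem

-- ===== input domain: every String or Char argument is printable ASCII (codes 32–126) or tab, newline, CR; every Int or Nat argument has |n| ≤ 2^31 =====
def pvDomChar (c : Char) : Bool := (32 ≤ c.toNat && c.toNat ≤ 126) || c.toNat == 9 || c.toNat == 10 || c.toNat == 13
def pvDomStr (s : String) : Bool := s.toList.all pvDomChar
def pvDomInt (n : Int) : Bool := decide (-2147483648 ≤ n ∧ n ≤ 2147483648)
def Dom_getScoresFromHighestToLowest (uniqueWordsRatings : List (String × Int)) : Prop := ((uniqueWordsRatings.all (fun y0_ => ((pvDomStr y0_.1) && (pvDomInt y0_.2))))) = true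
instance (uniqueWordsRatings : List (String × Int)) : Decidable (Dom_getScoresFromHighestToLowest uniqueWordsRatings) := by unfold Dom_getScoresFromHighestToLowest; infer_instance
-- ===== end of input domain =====

-- B replaces A's hand-rolled insertion sort by the built-in stable sort (reverse + reverse=True); faster (O(n log n) vs O(n^2)).

-- ===== PORT A =====
-- dict lookup uniqueWordsRatings[w]: first match; the default 0 is never hit since w is always a key of the dict
def pvRate (d : List (String × Int)) (w : String) : Int :=
  match d.find? (fun p => p.1 == w) with
  | some p => p.2
  | none => 0

-- A's inner 'for i in range(len(orderedWords)) … insert; break' / trailing append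
def pvInsertLoop (d : List (String × Int)) (w : String) : List String → List String
  | [] => [w]
  | o :: rest =>
      if pvRate d w ≥ pvRate d o then w :: o :: rest
      else o :: pvInsertLoop d w rest

def getScoresFromHighestToLowest (uniqueWordsRatings : List (String × Int)) : List String :=
  (uniqueWordsRatings.map (fun p => p.1)).foldl
    (fun orderedWords unorderedWord => pvInsertLoop uniqueWordsRatings unorderedWord orderedWords) []

-- ===== PORT B =====
-- list(d); .reverse(); .sort(key=d.get, reverse=True)  (d.get is only applied to keys of d, so pvRate is exact)
def getScoresFromHighestToLowest_alt (uniqueWordsRatings : List (String × Int)) : List String :=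
  let orderedWords := (uniqueWordsRatings.map (fun p => p.1)).reverse
  PySem.List.sorted orderedWords (fun w => pvRate uniqueWordsRatings w) true

-- ===== PRECONDITION & SPEC =====
def Spec_getScoresFromHighestToLowest (uniqueWordsRatings : List (String × Int)) (out : List String) : Prop := out = getScoresFromHighestToLowest_alt uniqueWordsRatings
instance (uniqueWordsRatings : List (String × Int)) (out : List String) : Decidable (Spec_getScoresFromHighestToLowest uniqueWordsRatings out) := by unfold Spec_getScoresFromHighestToLowest; infer_instance

-- ===== CLAIM (what is proved, stated in full; the proofs are below) =====
def Claim_equal_getScoresFromHighestToLowest : Prop := ∀ (uniqueWordsRatings : List (String × Int)), Dom_getScoresFromHighestToLowest uniqueWordsRatings → Spec_getScoresFromHighestToLowest uniqueWordsRatings (getScoresFromHighestToLowest uniqueWordsRatings)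

-- ===== LEMMAS AND PROOFS =====

-- one-step equations for PySem.List.insertBy (definitional; used to drive split_ifs)
theorem pv_insertBy_nil {α : Type} (bef : α → α → Bool) (x : α) :
    PySem.List.insertBy bef x [] = [x] := rfl

theorem pv_insertBy_cons {α : Type} (bef : α → α → Bool) (x y : α) (l : List α) :
    PySem.List.insertBy bef x (y :: l) =
      if bef x y then x :: y :: l else y :: PySem.List.insertBy bef x l := rfl

-- commutation: A's ≥-insert of w commutes with stable descending insert of v, for any ratings
theorem pv_comm (d : List (String × Int)) (w v : String) (l : List String) :
    pvInsertLoop d w (PySem.List.insertBy (fun a b => decide (pvRate d b < pvRate d a)) v l)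
      = PySem.List.insertBy (fun a b => decide (pvRate d b < pvRate d a)) v (pvInsertLoop d w l) := by
  induction l with
  | nil =>
      simp only [pv_insertBy_nil, pvInsertLoop, pv_insertBy_cons, decide_eq_true_eq, ge_iff_le]
      split_ifs with h1 h2 <;> first | rfl | omega
  | cons o rest ih =>
      simp only [pv_insertBy_cons, pvInsertLoop, decide_eq_true_eq, ge_iff_le]
      by_cases h1 : pvRate d o < pvRate d v <;>
      by_cases h2 : pvRate d o ≤ pvRate d w <;>
      by_cases h3 : pvRate d v ≤ pvRate d w <;>
        simp only [h1, h2, h3, if_pos, if_neg, not_false_iff,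
          pvInsertLoop, pv_insertBy_cons, decide_eq_true_eq, ih] <;>
        first
          | rfl
          | omega
          | (split_ifs <;> first | rfl | omega | simp [ih])

theorem pv_foldl_insertBy (d : List (String × Int)) (w : String) (ks : List String) (acc : List String) :
    ks.foldl (fun a u => pvInsertLoop d u a)
        (PySem.List.insertBy (fun a b => decide (pvRate d b < pvRate d a)) w acc)
      = PySem.List.insertBy (fun a b => decide (pvRate d b < pvRate d a)) w
        (ks.foldl (fun a u => pvInsertLoop d u a) acc) := by
  induction ks generalizing acc with
  | nil => rfl
  | cons u ks ih => simp only [List.foldl_cons, pv_comm, ih]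

theorem pv_main (d : List (String × Int)) (ks : List String) :
    ks.foldl (fun a u => pvInsertLoop d u a) []
      = ks.reverse.foldl
          (fun acc x => PySem.List.insertBy (fun a b => decide (pvRate d b < pvRate d a)) x acc) [] := by
  rw [List.foldl_reverse]
  induction ks with
  | nil => rfl
  | cons w ks ih =>
      have hb : pvInsertLoop d w [] =
          PySem.List.insertBy (fun a b => decide (pvRate d b < pvRate d a)) w [] := rfl
      simp only [List.foldl_cons, List.foldr_cons, hb, pv_foldl_insertBy, ih]

-- ===== VERDICT (by name: the statement is the Claim_ definition above) =====
theorem getScoresFromHighestToLowest_spec : Claim_equal_getScoresFromHighestToLowest := by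
  intro d _
  show getScoresFromHighestToLowest d = getScoresFromHighestToLowest_alt d
  unfold getScoresFromHighestToLowest getScoresFromHighestToLowest_alt PySem.List.sorted
  simp only [if_pos rfl]
  exact pv_main d (d.map (fun p => p.1))
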